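-- pv_equiv track=rewrite | github.com/evga7/Algorithm-practice | 프로그래머스/1/159994. 카드 뭉치/카드 뭉치.py | solution
-- ===== SOURCE A (Python) =====
-- def solution(cards1, cards2, goal):
--     answer = ''
--     idx,idx2=0,0
--     l,l2=len(cards1),len(cards2)
--     i=0
--     while (idx<l or idx2<l2) and i<len(goal):
--         if idx<l and goal[i]==cards1[idx]:
--             idx+=1
--         if idx2<l2 and goal[i]==cards2[idx2]:
--             idx2+=1
--         i+=1
--     return "Yes" if (idx+idx2)==len(goal) else "No"
-- ===== SOURCE B (Python) =====
-- def _consume(cards, goal):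
--     k = 0
--     n = len(cards)
--     for w in goal:
--         if k < n and w == cards[k]:
--             k += 1
--     return k
--
-- def solution(cards1, cards2, goal):
--     return "Yes" if _consume(cards1, goal) + _consume(cards2, goal) == len(goal) else "No"
-- ===== Notes on version B (the rewrite author's own statement) =====
-- stated objective: simpler
-- what changed: Replaces A's single merged while-loop with three pointers and an early-exit condition by one reusable greedy helper run independently per deck, summing the two consumed counts.
import Mathlib
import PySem

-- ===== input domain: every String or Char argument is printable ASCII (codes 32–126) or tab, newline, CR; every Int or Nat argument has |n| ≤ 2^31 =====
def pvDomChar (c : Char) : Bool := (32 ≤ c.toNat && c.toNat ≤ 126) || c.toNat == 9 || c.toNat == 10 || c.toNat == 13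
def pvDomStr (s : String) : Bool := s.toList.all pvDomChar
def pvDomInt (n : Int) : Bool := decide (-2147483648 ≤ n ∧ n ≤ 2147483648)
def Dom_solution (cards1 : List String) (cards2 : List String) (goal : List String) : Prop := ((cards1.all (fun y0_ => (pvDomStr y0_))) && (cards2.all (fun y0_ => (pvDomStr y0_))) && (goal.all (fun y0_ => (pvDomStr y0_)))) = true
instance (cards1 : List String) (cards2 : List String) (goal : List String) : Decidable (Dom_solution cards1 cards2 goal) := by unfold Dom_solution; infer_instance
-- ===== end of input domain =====

-- B replaces A's merged three-pointer while-loop by one greedy helper run per deck; objective: simpler.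

-- ===== PORT A =====
-- A's while-loop: state (idx, idx2, i), loop while (idx<l or idx2<l2) and i<len(goal)
def solutionLoop (cards1 : List String) (cards2 : List String) (goal : List String)
    (idx idx2 i : Nat) : Nat × Nat :=
  if (idx < cards1.length ∨ idx2 < cards2.length) ∧ i < goal.length then
    let idx' := if idx < cards1.length ∧ goal[i]! = cards1[idx]! then idx + 1 else idx
    let idx2' := if idx2 < cards2.length ∧ goal[i]! = cards2[idx2]! then idx2 + 1 else idx2
    solutionLoop cards1 cards2 goal idx' idx2' (i + 1)
  else (idx, idx2)
termination_by goal.length - i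
decreasing_by omega

def solution (cards1 : List String) (cards2 : List String) (goal : List String) : String :=
  let p := solutionLoop cards1 cards2 goal 0 0 0
  if p.1 + p.2 = goal.length then "Yes" else "No"

-- ===== PORT B =====
-- helper _consume: for w in goal: if k < n and w == cards[k]: k += 1
def consume (cards : List String) (goal : List String) : Nat :=
  goal.foldl (fun k w => if k < cards.length ∧ w = cards[k]! then k + 1 else k) 0

def solution_alt (cards1 : List String) (cards2 : List String) (goal : List String) : String :=
  if consume cards1 goal + consume cards2 goal = goal.length then "Yes" else "No"

-- ===== PRECONDITION & SPEC =====
def Spec_solution (cards1 : List String) (cards2 : List String) (goal : List String) (out : String) : Prop := out = solution_alt cards1 cards2 goal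
instance (cards1 : List String) (cards2 : List String) (goal : List String) (out : String) : Decidable (Spec_solution cards1 cards2 goal out) := by unfold Spec_solution; infer_instance

-- ===== CLAIM (what is proved, stated in full; the proofs are below) =====
def Claim_equal_solution : Prop := ∀ (cards1 : List String) (cards2 : List String) (goal : List String), Dom_solution cards1 cards2 goal → Spec_solution cards1 cards2 goal (solution cards1 cards2 goal)

-- ===== LEMMAS AND PROOFS =====

-- once the pointer is past the end of the deck, the greedy fold is constant
theorem consume_fold_stuck (cards : List String) (rest : List String) (k : Nat)
    (h : cards.length ≤ k) :
    rest.foldl (fun k w => if k < cards.length ∧ w = cards[k]! then k + 1 else k) k = k := by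
  induction rest with
  | nil => rfl
  | cons w rest ih =>
      simp only [List.foldl_cons]
      rw [if_neg (by omega)]
      exact ih

-- A's loop computes the two independent greedy folds over the remaining suffix of goal
theorem solutionLoop_eq (cards1 cards2 goal : List String) :
    ∀ (n idx idx2 i : Nat), goal.length - i ≤ n →
    solutionLoop cards1 cards2 goal idx idx2 i =
      ((goal.drop i).foldl (fun k w => if k < cards1.length ∧ w = cards1[k]! then k + 1 else k) idx,
       (goal.drop i).foldl (fun k w => if k < cards2.length ∧ w = cards2[k]! then k + 1 else k) idx2) := by
  intro n
  induction n with
  | zero =>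
      intro idx idx2 i hn
      have hi : goal.length ≤ i := by omega
      rw [solutionLoop, if_neg (by omega), List.drop_of_length_le hi]
      rfl
  | succ n ih =>
      intro idx idx2 i hn
      rw [solutionLoop]
      by_cases hc : (idx < cards1.length ∨ idx2 < cards2.length) ∧ i < goal.length
      · rw [if_pos hc]
        have hi : i < goal.length := hc.2
        have hdrop : goal.drop i = goal[i]! :: goal.drop (i + 1) := by
          have : goal[i]! = goal[i] := getElem!_pos goal i hi
          rw [this]
          exact (List.drop_eq_getElem_cons hi)
        rw [ih _ _ (i + 1) (by omega), hdrop]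
        simp only [List.foldl_cons]
      · rw [if_neg hc]
        rcases Nat.lt_or_ge i goal.length with hi | hi
        · have h1 : cards1.length ≤ idx := by
            by_contra h; exact hc ⟨Or.inl (by omega), hi⟩
          have h2 : cards2.length ≤ idx2 := by
            by_contra h; exact hc ⟨Or.inr (by omega), hi⟩
          rw [consume_fold_stuck cards1 _ idx h1, consume_fold_stuck cards2 _ idx2 h2]
        · rw [List.drop_of_length_le hi]
          rfl

-- ===== VERDICT (by name: the statement is the Claim_ definition above) =====
theorem solution_spec : Claim_equal_solution := by
  intro cards1 cards2 goal _
  unfold Spec_solution solution solution_alt consume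
  rw [solutionLoop_eq cards1 cards2 goal goal.length 0 0 0 (by omega)]
  simp
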